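-- pv_equiv track=rewrite | github.com/chauhan112/Training | harsh/prime_section/prime.py | delete_number
-- ===== SOURCE A (Python) =====
-- def delete_number(l, pos):
--     pos = pos - 1
--     c_list = []
--     l_len = len(l)
--     for i in range(0, l_len):
--         if i != l_len - pos - 1:
--             c_list.append(l[i])
--     return c_list
-- ===== SOURCE B (Python) =====
-- def delete_number(l, pos):
--     idx = len(l) - pos
--     if 0 <= idx < len(l):
--         return l[:idx] + l[idx+1:]
--     return l[:]
-- ===== Notes on version B (the rewrite author's own statement) =====
-- stated objective: simpler
-- what changed: Replaces the per-index comparison loop with a direct computation of the skipped index and two contiguous slice copies concatenated (or a plain copy when the index is out of range).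
import Mathlib
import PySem

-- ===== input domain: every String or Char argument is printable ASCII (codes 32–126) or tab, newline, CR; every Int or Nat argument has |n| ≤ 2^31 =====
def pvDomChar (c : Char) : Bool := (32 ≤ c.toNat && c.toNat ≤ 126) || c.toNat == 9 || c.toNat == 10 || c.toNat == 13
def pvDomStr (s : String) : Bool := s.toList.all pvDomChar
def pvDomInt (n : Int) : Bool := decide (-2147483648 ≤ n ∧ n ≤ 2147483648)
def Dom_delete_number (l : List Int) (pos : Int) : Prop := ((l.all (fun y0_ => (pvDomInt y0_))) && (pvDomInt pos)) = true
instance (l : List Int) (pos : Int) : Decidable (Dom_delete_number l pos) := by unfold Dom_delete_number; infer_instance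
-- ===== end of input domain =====

-- B replaces A's per-index comparison loop with direct slicing around the computed skip index (simpler decomposition, same O(n) cost).


-- ===== PORT A =====
def delete_number (l : List Int) (pos : Int) : List Int :=
  let pos := pos - 1
  let l_len : Int := PySem.List.len l
  (PySem.List.pyRange 0 l_len 1).foldl
    (fun c_list i =>
      if i ≠ l_len - pos - 1 then c_list ++ [PySem.List.pyGetD l i 0] else c_list)
    []

-- ===== PORT B =====
def delete_number_alt (l : List Int) (pos : Int) : List Int :=
  let idx : Int := PySem.List.len l - pos
  if 0 ≤ idx ∧ idx < PySem.List.len l then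
    PySem.List.slice l none (some idx) ++ PySem.List.slice l (some (idx + 1)) none
  else
    PySem.List.slice l none none

-- ===== PRECONDITION & SPEC =====
def Spec_delete_number (l : List Int) (pos : Int) (out : List Int) : Prop := out = delete_number_alt l pos
instance (l : List Int) (pos : Int) (out : List Int) : Decidable (Spec_delete_number l pos out) := by unfold Spec_delete_number; infer_instance

-- ===== CLAIM (what is proved, stated in full; the proofs are below) =====
def Claim_equal_delete_number : Prop := ∀ (l : List Int) (pos : Int), Dom_delete_number l pos → Spec_delete_number l pos (delete_number l pos)

-- ===== LEMMAS AND PROOFS =====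

-- mapping pyGetD over range(0, k) is take k
lemma map_pyGetD_pyRange_take (l : List Int) (k : Int) (_h0 : 0 ≤ k) (hn : k ≤ (l.length : Int)) :
    (PySem.List.pyRange 0 k 1).map (fun i => PySem.List.pyGetD l i 0) = l.take k.toNat := by
  apply List.ext_getElem
  · simp [PySem.List.length_pyRange_one]
    omega
  · intro i hi hi'
    have hik : (i : Int) < k := by
      have := hi; simp [PySem.List.length_pyRange_one] at this; omega
    simp only [List.getElem_map, PySem.List.getElem_pyRange_one, List.getElem_take]
    rw [show (0 : Int) + (i : Int) = ((i : Nat) : Int) by omega]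
    rw [PySem.List.pyGetD_natCast]
    have : i < l.length := by omega
    simp [List.getD, this]
lemma all_ne_filter (s : List Int) (k : Int) (h : ∀ x ∈ s, x ≠ k) :
    s.filter (fun i => i ≠ k) = s := by
  apply List.filter_eq_self.mpr
  intro x hx
  simpa using h x hx

lemma loop_eq (l : List Int) (k : Int) :
    (PySem.List.pyRange 0 (PySem.List.len l) 1).foldl
      (fun c_list i => if i ≠ k then c_list ++ [PySem.List.pyGetD l i 0] else c_list) [] =
    if 0 ≤ k ∧ k < PySem.List.len l then
      PySem.List.slice l none (some k) ++ PySem.List.slice l (some (k + 1)) none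
    else PySem.List.slice l none none := by
  have hlen : PySem.List.len l = (l.length : Int) := by simp [PySem.List.len]
  rw [PySem.List.foldl_append_ite (fun i => i ≠ k) (fun i => PySem.List.pyGetD l i 0)]
  rw [List.nil_append]
  by_cases hin : 0 ≤ k ∧ k < PySem.List.len l
  · rw [if_pos hin]
    obtain ⟨h0, h1⟩ := hin
    rw [PySem.List.pyRange_one_append 0 k (PySem.List.len l) h0 (le_of_lt h1)]
    rw [PySem.List.pyRange_one_cons h1]
    rw [List.filter_append, List.filter_cons]
    simp only [ne_eq, not_true_eq_false, decide_false, Bool.false_eq_true, if_false]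
    rw [all_ne_filter _ k (by intro x hx; rw [PySem.List.mem_pyRange_one] at hx; omega)]
    rw [all_ne_filter _ k (by intro x hx; rw [PySem.List.mem_pyRange_one] at hx; omega)]
    rw [List.map_append]
    rw [map_pyGetD_pyRange_take l k h0 (by omega)]
    rw [PySem.List.map_pyGetD_pyRange l 0 (by omega : (0:Int) ≤ k + 1)]
    rw [PySem.List.slice_to l h0, PySem.List.slice_from l (by omega : (0:Int) ≤ k + 1)]
  · rw [if_neg hin]
    rw [PySem.List.slice_none_none]
    rw [all_ne_filter _ k (by intro x hx; rw [PySem.List.mem_pyRange_one] at hx; omega)]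
    rw [PySem.List.map_pyGetD_pyRange_zero]

theorem delete_number_spec : Claim_equal_delete_number := by
  intro l pos _
  show delete_number l pos = delete_number_alt l pos
  unfold delete_number delete_number_alt
  simp only []
  have hk : PySem.List.len l - (pos - 1) - 1 = PySem.List.len l - pos := by ring
  rw [hk, loop_eq l (PySem.List.len l - pos)]
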